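-- pv_equiv track=rewrite | github.com/PhonologicalCorpusTools/CorpusTools | corpustools/corpus/io/text_ilg.py | calculate_lines_per_gloss
-- ===== SOURCE A (Python) =====
-- from collections import Counter, defaultdict
--
-- def calculate_lines_per_gloss(lines):
--     line_counts = [len(x[1]) for x in lines]
--     equaled = list()
--     number = 1
--     for i,line in enumerate(line_counts):
--         if i == 0:
--             equaled.append(False)
--         else:
--             equaled.append(line == line_counts[i-1])
--     if False not in equaled[1:]:
--         #All lines happen to have the same length
--         for i in range(2,6):
--             if len(lines) % i == 0:
--                 number = i
--     else:
--         false_intervals = list()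
--         ind = 0
--         for i,e in enumerate(equaled):
--             if i == 0:
--                 continue
--             if not e:
--                 false_intervals.append(i - ind)
--                 ind = i
--         false_intervals.append(i+1 - ind)
--         counter = Counter(false_intervals)
--         number = max(counter.keys(), key = lambda x: (counter[x],x))
--         if number > 10:
--             prev_maxes = set([number])
--             while number > 10:
--                 prev_maxes.add(number)
--                 number = max(x for x in false_intervals if x not in prev_maxes)
--     return number
-- ===== SOURCE B (Python) =====
-- from collections import Counter
--
-- def _runs(counts):
--     # run-length encoding by structural recursion: lengths of maximal blocks of equal values
--     if not counts:
--         return []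
--     k = 1
--     for c in counts[1:]:
--         if c != counts[0]:
--             break
--         k += 1
--     return [k] + _runs(counts[k:])
--
-- def calculate_lines_per_gloss(lines):
--     counts = [len(x[1]) for x in lines]
--     if len(set(counts)) <= 1:
--         # a single uniform block (or no lines): largest of 2..5 dividing len(lines), default 1
--         return max((d for d in (2, 3, 4, 5) if len(lines) % d == 0), default=1)
--     runs = _runs(counts)
--     c = Counter(runs)
--     top = max(c.values())
--     number = max(v for v in c if c[v] == top)
--     if number <= 10:
--         return number
--     return max(r for r in runs if r <= 10)
-- ===== Notes on version B (the rewrite author's own statement) =====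
-- stated objective: alternative
-- what changed: B drops A's equaled-flags list and membership test (replaced by a set-cardinality test on the line lengths), A's index-tracking interval loop (replaced by a recursive run-length encoding), A's composite-(count,value)-key max (replaced by two plain maxes: the peak multiplicity, then the largest run length attaining it), and A's prev_maxes/while descent (replaced by one max over the run lengths <= 10); Pre_ excludes only the inputs where both A and B raise ValueError.
import Mathlib
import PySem

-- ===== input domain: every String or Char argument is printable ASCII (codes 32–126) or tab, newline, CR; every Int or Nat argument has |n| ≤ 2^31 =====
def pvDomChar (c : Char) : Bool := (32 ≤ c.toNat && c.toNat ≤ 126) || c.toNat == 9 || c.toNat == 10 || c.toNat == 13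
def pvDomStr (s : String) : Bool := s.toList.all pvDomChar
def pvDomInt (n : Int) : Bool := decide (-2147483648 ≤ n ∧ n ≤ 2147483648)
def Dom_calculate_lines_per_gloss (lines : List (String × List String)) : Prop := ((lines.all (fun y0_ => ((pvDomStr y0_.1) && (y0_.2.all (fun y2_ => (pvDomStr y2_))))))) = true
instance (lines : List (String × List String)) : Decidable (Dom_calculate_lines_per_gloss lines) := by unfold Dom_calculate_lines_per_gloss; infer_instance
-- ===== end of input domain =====

-- B replaces A's staged scans (equaled flag list + membership test, index-tracking
-- interval loop, composite-key max, prev_maxes while-descent) by a recursive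
-- run-length encoding, a set-cardinality uniformity test, two plain maxes for the
-- modal run, and one filtered max; objective: alternative decomposition, same
-- behaviour (including the same ValueError inputs, which Pre_ excludes).

-- ===== PORT A =====
-- the while-loop 'while number > 10: prev_maxes.add(number); number = max(x for x in
-- false_intervals if x not in prev_maxes)'; fuel only bounds the (finite) number of
-- iterations — it never changes the computed value; 'none' is the ValueError of max()
-- on an empty generator
def pvWhileA (false_intervals : List Int) (fuel : Nat) (prev_maxes : PySem.Set Int) (number : Int) : Option Int :=
  if number > 10 then
    match fuel with
    | 0 => none
    | f + 1 =>
      let pm := PySem.Set.add prev_maxes number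
      match PySem.List.max? (false_intervals.filter (fun x => !(PySem.Set.contains pm x))) (fun y => y) with
      | none => none
      | some m => pvWhileA false_intervals f pm m
  else some number

def calculate_lines_per_gloss (lines : List (String × List String)) : Int :=
  let line_counts : List Int := lines.map (fun x => (x.2.length : Int))
  let equaled : List Bool := (PySem.List.enumerate line_counts).foldl
    (fun eq p => eq ++ [if p.1 == 0 then false
                        else p.2 == PySem.List.pyGetD line_counts (p.1 - 1) 0]) []
  -- index i-1 is taken only for i ≥ 1, so pyGetD's default is never used
  if !((PySem.List.slice equaled (some 1) none).contains false) then
    (PySem.List.pyRange 2 6).foldl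
      (fun number i => if PySem.Int.mod (lines.length : Int) i == 0 then i else number) 1
  else
    let st := (PySem.List.enumerate equaled).foldl
      (fun (st : List Int × Int) p =>
        if p.1 == 0 then st
        else if !p.2 then (st.1 ++ [p.1 - st.2], p.1) else st) ([], 0)
    -- the final append uses the last loop index i = len(equaled) - 1
    let false_intervals := st.1 ++ [((equaled.length : Int) - 1) + 1 - st.2]
    let counter := PySem.Dict.counter false_intervals
    -- counter.keys is nonempty here, so Python's max() cannot raise and getD's default is never used
    let number := (PySem.List.max2? counter.keys (fun x => counter.getD x 0) (fun x => x)).getD 0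
    if number > 10 then
      -- .getD 0 is reached only when the loop's max() raises ValueError; Pre_ excludes those inputs
      (pvWhileA false_intervals false_intervals.length (PySem.Set.ofList [number]) number).getD 0
    else
      number

-- ===== PORT B =====
-- the inner 'for c in counts[1:]: if c != counts[0]: break; k += 1' of _runs,
-- as structural recursion over counts[1:] (exact: counts the equal prefix)
def pvRunScan (c0 : Int) : List Int → Nat
  | [] => 0
  | c :: t => if c != c0 then 0 else 1 + pvRunScan c0 t

theorem pvRunScan_le (c0 : Int) (t : List Int) : pvRunScan c0 t ≤ t.length := by
  induction t with
  | nil => simp [pvRunScan]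
  | cons c u ih =>
    unfold pvRunScan
    split
    · simp
    · simp
      omega

-- _runs: recursive run-length encoding; the slice counts[k:] (k = 1 + scan ≥ 0) is drop k
def pvRuns : List Int → List Int
  | [] => []
  | c :: t =>
    let k := 1 + pvRunScan c t
    ((k : Nat) : Int) :: pvRuns ((c :: t).drop k)
termination_by l => l.length
decreasing_by
  have := pvRunScan_le c t
  simp only [List.length_drop, List.length_cons]
  omega

def calculate_lines_per_gloss_alt (lines : List (String × List String)) : Int :=
  let counts : List Int := lines.map (fun x => (x.2.length : Int))
  if PySem.Set.len (PySem.Set.ofList counts) ≤ 1 then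
    PySem.List.maxD (([2, 3, 4, 5] : List Int).filter
      (fun d => PySem.Int.mod (lines.length : Int) d == 0)) (fun x => x) 1
  else
    let runs := pvRuns counts
    let c := PySem.Dict.counter runs
    -- c.values is nonempty here, so Python's max() cannot raise; .getD 0 is never used
    let top := (PySem.List.max? c.values (fun y => y)).getD 0
    let number := (PySem.List.max? (c.keys.filter (fun v => c.getD v 0 == top)) (fun y => y)).getD 0
    if number ≤ 10 then number
    -- .getD 0 is reached only when Python's max() raises ValueError; Pre_ excludes those inputs
    else (PySem.List.max? (runs.filter (fun r => decide (r ≤ 10))) (fun y => y)).getD 0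

-- ===== PRECONDITION & SPEC =====
-- k is a boundary of a maximal run of equal line lengths
def pvIsBoundary (counts : List Int) (n k : Int) : Bool :=
  k == 0 || k == n ||
    (decide (1 ≤ k) && decide (k < n) &&
      !(PySem.List.pyGetD counts k 0 == PySem.List.pyGetD counts (k - 1) 0))

-- Pre_ excludes exactly the inputs on which A raises ValueError (max() of an empty
-- sequence): glosses whose line-length runs are not all equal and where every maximal
-- run of equal line lengths is longer than 10; B raises the same ValueError there.
def Pre_calculate_lines_per_gloss (lines : List (String × List String)) : Prop :=
  let counts : List Int := lines.map (fun x => (x.2.length : Int))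
  let n : Int := (lines.length : Int)
  (∀ i ∈ PySem.List.pyRange 1 n,
      PySem.List.pyGetD counts i 0 = PySem.List.pyGetD counts (i - 1) 0)
  ∨ (∃ i ∈ PySem.List.pyRange 0 (n + 1), ∃ j ∈ PySem.List.pyRange 0 (n + 1),
      pvIsBoundary counts n i = true ∧ pvIsBoundary counts n j = true ∧ i < j ∧ j - i ≤ 10)
instance (lines : List (String × List String)) : Decidable (Pre_calculate_lines_per_gloss lines) := by
  unfold Pre_calculate_lines_per_gloss; infer_instance

def pvWitness_calculate_lines_per_gloss : (List (String × List String)) :=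
  [("a", ["x"]), ("b", [])]

def Spec_calculate_lines_per_gloss (lines : List (String × List String)) (out : Int) : Prop := out = calculate_lines_per_gloss_alt lines
instance (lines : List (String × List String)) (out : Int) : Decidable (Spec_calculate_lines_per_gloss lines out) := by unfold Spec_calculate_lines_per_gloss; infer_instance

-- ===== CLAIM (what is proved, stated in full; the proofs are below) =====
def Claim_equal_calculate_lines_per_gloss : Prop := ∀ (lines : List (String × List String)), Dom_calculate_lines_per_gloss lines → Pre_calculate_lines_per_gloss lines → Spec_calculate_lines_per_gloss lines (calculate_lines_per_gloss lines)

-- ===== LEMMAS AND PROOFS =====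

-- ---- structural helpers used only by the proofs ----

-- consecutive differences of a list
def pvDiffs : List Int → List Int
  | a :: b :: t => (b - a) :: pvDiffs (b :: t)
  | _ => []

-- gap lengths between break points, closed by n
def pvGaps (x : Int) (bs : List Int) (n : Int) : List Int :=
  match bs with
  | [] => [n - x]
  | b :: t => (b - x) :: pvGaps b t n

def pvGapsInit (x : Int) : List Int → List Int
  | [] => []
  | b :: t => (b - x) :: pvGapsInit b t

def pvLastD (x : Int) : List Int → Int
  | [] => x
  | b :: t => pvLastD b t

theorem pvDiffs_cons_append (x : Int) (bs : List Int) (n : Int) :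
    pvDiffs (x :: (bs ++ [n])) = pvGaps x bs n := by
  induction bs generalizing x with
  | nil => simp [pvDiffs, pvGaps]
  | cons b t ih => simp [pvDiffs, pvGaps, ih]

theorem pvGaps_split (x : Int) (bs : List Int) (n : Int) :
    pvGaps x bs n = pvGapsInit x bs ++ [n - pvLastD x bs] := by
  induction bs generalizing x with
  | nil => simp [pvGaps, pvGapsInit, pvLastD]
  | cons b t ih => simp [pvGaps, pvGapsInit, pvLastD, ih]

theorem pvGaps_ne_nil (x : Int) (bs : List Int) (n : Int) : pvGaps x bs n ≠ [] := by
  cases bs <;> simp [pvGaps]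

theorem pvGfold (bs : List Int) (acc : List Int) (ind : Int) :
    bs.foldl (fun (st : List Int × Int) b => (st.1 ++ [b - st.2], b)) (acc, ind)
      = (acc ++ pvGapsInit ind bs, pvLastD ind bs) := by
  induction bs generalizing acc ind with
  | nil => simp [pvGapsInit, pvLastD]
  | cons b t ih => simp [List.foldl_cons, ih, pvGapsInit, pvLastD]

-- in a strictly increasing list, two members i < j bound some consecutive difference ≤ j - i
theorem pvDiffLe (l : List Int) (hp : l.Pairwise (· < ·)) (i j : Int)
    (hi : i ∈ l) (hj : j ∈ l) (hij : i < j) : ∃ v ∈ pvDiffs l, v ≤ j - i := by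
  induction l with
  | nil => simp at hi
  | cons a rest ih =>
    have hpr : rest.Pairwise (· < ·) := (List.pairwise_cons.mp hp).2
    have hlt : ∀ y ∈ rest, a < y := (List.pairwise_cons.mp hp).1
    rcases List.mem_cons.mp hi with hia | hir
    · -- i = a
      subst hia
      rcases List.mem_cons.mp hj with hja | hjr
      · omega
      · rcases rest with _ | ⟨b, t⟩
        · simp at hjr
        · refine ⟨b - i, by simp [pvDiffs], ?_⟩
          rcases List.mem_cons.mp hjr with h | h
          · omega
          · have := (List.pairwise_cons.mp hpr).1 j h
            omega
    · rcases List.mem_cons.mp hj with hja | hjr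
      · have := hlt i hir; omega
      · rcases ih hpr hir hjr with ⟨v, hv, hvle⟩
        refine ⟨v, ?_, hvle⟩
        rcases rest with _ | ⟨b, t⟩
        · simp [pvDiffs] at hv
        · simp [pvDiffs]
          right
          exact hv

-- max? with the identity key returns exactly the maximum value
theorem pvMaxChar (l : List Int) (v : Int) (hv : v ∈ l) (hub : ∀ y ∈ l, y ≤ v) :
    PySem.List.max? l (fun y => y) = some v := by
  have hne : l ≠ [] := by intro h; subst h; simp at hv
  cases hmax : PySem.List.max? l (fun y => y) with
  | none => exact absurd ((PySem.List.max?_eq_none_iff l _).mp hmax) hne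
  | some w =>
    have hwmem := PySem.List.max?_mem hmax
    have hwmax := PySem.List.max?_isMax hmax
    have h1 : v ≤ w := hwmax v hv
    have h2 : w ≤ v := hub w hwmem
    have : w = v := le_antisymm h2 h1
    rw [this]

-- a nonempty list has a max2? and it is a member
theorem pvMax2FoldMem {α κ₁ κ₂ : Type} [LT κ₁] [DecidableLT κ₁] [LT κ₂] [DecidableLT κ₂]
    (k1 : α → κ₁) (k2 : α → κ₂) (l : List α) (acc : Option α) (m : α)
    (h : l.foldl (fun acc x =>
        match acc with
        | none => some x
        | some mm => if (decide (k1 mm < k1 x) || !decide (k1 x < k1 mm) && decide (k2 mm < k2 x)) = true then some x else some mm) acc = some m) :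
    acc = some m ∨ m ∈ l := by
  induction l generalizing acc with
  | nil => left; simpa using h
  | cons x t ih =>
    rw [List.foldl_cons] at h
    rcases ih _ h with hstep | hmem
    · cases acc with
      | none =>
        simp at hstep
        right; simp [hstep.symm]
      | some mm =>
        by_cases hc : (decide (k1 mm < k1 x) || !decide (k1 x < k1 mm) && decide (k2 mm < k2 x)) = true
        · simp [hc] at hstep
          right; simp [hstep.symm]
        · simp [hc] at hstep
          left; simp [hstep.symm]
    · right; exact List.mem_cons_of_mem _ hmem

theorem pvMax2Mem {α κ₁ κ₂ : Type} [LT κ₁] [DecidableLT κ₁] [LT κ₂] [DecidableLT κ₂]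
    (xs : List α) (k1 : α → κ₁) (k2 : α → κ₂) (m : α)
    (h : PySem.List.max2? xs k1 k2 = some m) : m ∈ xs := by
  unfold PySem.List.max2? at h
  rcases pvMax2FoldMem k1 k2 xs none m h with h' | h'
  · simp at h'
  · exact h'

theorem pvMax2Some {α κ₁ κ₂ : Type} [LT κ₁] [DecidableLT κ₁] [LT κ₂] [DecidableLT κ₂]
    (xs : List α) (k1 : α → κ₁) (k2 : α → κ₂) (hne : xs ≠ []) :
    ∃ m, PySem.List.max2? xs k1 k2 = some m := by
  unfold PySem.List.max2?
  rcases xs with _ | ⟨x, t⟩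
  · exact absurd rfl hne
  · rw [List.foldl_cons]
    show ∃ m, t.foldl _ (some x) = some m
    clear hne
    induction t generalizing x with
    | nil => exact ⟨x, rfl⟩
    | cons y u ih =>
      rw [List.foldl_cons]
      by_cases hc : (decide (k1 x < k1 y) || !decide (k1 y < k1 x) && decide (k2 x < k2 y)) = true
      · simpa [hc] using ih y
      · simpa [hc] using ih x

-- max2? with Int keys is lexicographically maximal over the list
theorem pvMax2FoldGe {α : Type} (k1 k2 : α → Int) (l : List α) (a m : α)
    (h : l.foldl (fun acc x =>
        match acc with
        | none => some x
        | some mm => if (decide (k1 mm < k1 x) || !decide (k1 x < k1 mm) && decide (k2 mm < k2 x)) = true then some x else some mm) (some a) = some m) :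
    (∀ y ∈ l, k1 y < k1 m ∨ (k1 y = k1 m ∧ k2 y ≤ k2 m)) ∧
      (k1 a < k1 m ∨ (k1 a = k1 m ∧ k2 a ≤ k2 m)) := by
  induction l generalizing a with
  | nil =>
    simp at h
    subst h
    exact ⟨by simp, by omega⟩
  | cons x t ih =>
    rw [List.foldl_cons] at h
    by_cases hc : (decide (k1 a < k1 x) || !decide (k1 x < k1 a) && decide (k2 a < k2 x)) = true
    · simp only [hc, if_true] at h
      rcases ih x h with ⟨hall, hx⟩
      simp only [Bool.or_eq_true, Bool.and_eq_true, decide_eq_true_eq, Bool.not_eq_eq_eq_not,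
        Bool.not_true, decide_eq_false_iff_not, not_lt] at hc
      refine ⟨?_, ?_⟩
      · intro y hy
        rcases List.mem_cons.mp hy with rfl | hyt
        · exact hx
        · exact hall y hyt
      · omega
    · simp only [hc] at h
      rcases ih a h with ⟨hall, ha⟩
      simp only [Bool.or_eq_true, Bool.and_eq_true, decide_eq_true_eq, Bool.not_eq_eq_eq_not,
        Bool.not_true, decide_eq_false_iff_not, not_lt, not_or, not_and] at hc
      refine ⟨?_, ha⟩
      intro y hy
      rcases List.mem_cons.mp hy with rfl | hyt
      · omega
      · exact hall y hyt

theorem pvMax2IsMax {α : Type} (xs : List α) (k1 k2 : α → Int) (m : α)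
    (h : PySem.List.max2? xs k1 k2 = some m) :
    ∀ y ∈ xs, k1 y < k1 m ∨ (k1 y = k1 m ∧ k2 y ≤ k2 m) := by
  unfold PySem.List.max2? at h
  rcases xs with _ | ⟨x, t⟩
  · simp at h
  · rw [List.foldl_cons] at h
    intro y hy
    rcases List.mem_cons.mp hy with rfl | hyt
    · exact (pvMax2FoldGe k1 k2 t y m h).2
    · exact (pvMax2FoldGe k1 k2 t x m h).1 y hyt

-- ---- the prev_maxes descent computes the largest interval value ≤ 10 ----

theorem pvSetContainsIffMem (s : PySem.Set Int) (x : Int) :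
    PySem.Set.contains s x = true ↔ x ∈ s := by
  unfold PySem.Set.contains
  simp

theorem pvSetContainsAdd {s : PySem.Set Int} {x y : Int} :
    PySem.Set.contains (PySem.Set.add s y) x = (PySem.Set.contains s x || x == y) := by
  rw [Bool.eq_iff_iff]
  simp only [Bool.or_eq_true, beq_iff_eq, pvSetContainsIffMem]
  exact PySem.Set.mem_add s y x

-- length of the foldl-add closure is bounded
theorem pvFoldlAddLen (l : List Int) (s : PySem.Set Int) :
    (l.foldl PySem.Set.add s).length ≤ s.length + l.length := by
  induction l generalizing s with
  | nil => simp
  | cons x t ih =>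
    rw [List.foldl_cons]
    have hstep : (PySem.Set.add s x).length ≤ s.length + 1 := by
      unfold PySem.Set.add
      split <;> simp
    calc (t.foldl PySem.Set.add (PySem.Set.add s x)).length
        ≤ (PySem.Set.add s x).length + t.length := ih _
      _ ≤ s.length + (t.length + 1) := by omega
      _ = s.length + (x :: t).length := by simp

theorem pvOfListLen (l : List Int) : (PySem.Set.ofList l).length ≤ l.length := by
  have := pvFoldlAddLen l []
  simpa [PySem.Set.ofList_eq_foldl] using this

-- removing one present element from a Nodup list by filter drops the length by 1
theorem pvFilterNeLen (t : List Int) (y : Int) (hnd : t.Nodup) (hy : y ∈ t) :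
    (t.filter (fun x => !(x == y))).length = t.length - 1 := by
  induction t with
  | nil => simp at hy
  | cons a u ih =>
    by_cases hay : a = y
    · subst hay
      have hnot : a ∉ u := (List.nodup_cons.mp hnd).1
      have hu : u.filter (fun x => !(x == a)) = u := by
        apply List.filter_eq_self.mpr
        intro x hx
        have : ¬(x = a) := fun h => hnot (h ▸ hx)
        simp [this]
      simp [hu]
    · have hyu : y ∈ u := by
        rcases List.mem_cons.mp hy with h | h
        · exact absurd h.symm hay
        · exact h
      have hlen : 1 ≤ u.length := List.length_pos_of_mem hyu
      have ihh := ih (List.nodup_cons.mp hnd).2 hyu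
      simp only [List.filter_cons]
      rw [if_pos (by simp [hay])]
      simp only [List.length_cons, ihh]
      omega

def pvMeasure (I : List Int) (s : PySem.Set Int) : Nat :=
  ((PySem.Set.ofList I).filter (fun x => !(PySem.Set.contains s x))).length

theorem pvMeasureAdd (I : List Int) (s : PySem.Set Int) (y : Int)
    (hy : y ∈ I) (hns : PySem.Set.contains s y = false) :
    pvMeasure I (PySem.Set.add s y) = pvMeasure I s - 1 := by
  unfold pvMeasure
  have h1 : ∀ x : Int, (!(PySem.Set.contains (PySem.Set.add s y) x))
      = ((!(PySem.Set.contains s x)) && !(x == y)) := by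
    intro x
    rw [pvSetContainsAdd]
    cases PySem.Set.contains s x <;> cases hxy : (x == y) <;> simp
  have h2 : (PySem.Set.ofList I).filter (fun x => !(PySem.Set.contains (PySem.Set.add s y) x))
      = ((PySem.Set.ofList I).filter (fun x => !(PySem.Set.contains s x))).filter (fun x => !(x == y)) := by
    rw [List.filter_filter]
    apply List.filter_congr
    intro x _
    rw [h1]
    exact Bool.and_comm _ _
  rw [h2]
  apply pvFilterNeLen
  · exact ((PySem.Set.nodup_ofList I)).filter _
  · simp only [List.mem_filter]
    refine ⟨(PySem.Set.mem_ofList I y).mpr hy, by rw [hns]; rfl⟩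

theorem pvMeasureLe (I : List Int) (s : PySem.Set Int) : pvMeasure I s ≤ I.length := by
  unfold pvMeasure
  calc _ ≤ (PySem.Set.ofList I).length := List.length_filter_le _ _
    _ ≤ I.length := pvOfListLen I

theorem pvWhileLemma (I : List Int) (fuel : Nat) (pm : PySem.Set Int) (number : Int)
    (h1 : ∀ x ∈ pm, 10 < x) (h2 : number ∈ I) (h3 : ∃ x ∈ I, x ≤ 10)
    (h4 : pvMeasure I (PySem.Set.add pm number) ≤ fuel)
    (h5 : number ≤ 10 → ∀ y ∈ I, y ≤ 10 → y ≤ number) :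
    pvWhileA I fuel pm number
      = PySem.List.max? (I.filter (fun v => decide (v ≤ 10))) (fun y => y) := by
  induction fuel generalizing pm number with
  | zero =>
    rcases h3 with ⟨x0, hx0I, hx0le⟩
    by_cases hgt : number > 10
    · -- measure ≥ 1 contradicts h4
      exfalso
      have hx0mem : x0 ∈ (PySem.Set.ofList I).filter
          (fun x => !(PySem.Set.contains (PySem.Set.add pm number) x)) := by
        simp only [List.mem_filter]
        constructor
        · exact (PySem.Set.mem_ofList I x0).mpr hx0I
        · cases hc : PySem.Set.contains (PySem.Set.add pm number) x0
          · rfl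
          · exfalso
            rcases (PySem.Set.mem_add pm number x0).mp
              ((pvSetContainsIffMem _ _).mp hc) with hmem | heq
            · exact absurd hx0le (by have := h1 x0 hmem; omega)
            · omega
      have : 1 ≤ pvMeasure I (PySem.Set.add pm number) := by
        unfold pvMeasure
        exact List.length_pos_of_mem hx0mem
      omega
    · -- number ≤ 10: the loop exits at once with the max of the small intervals
      have hle : number ≤ 10 := by omega
      rw [pvWhileA, if_neg (by omega)]
      symm
      apply pvMaxChar
      · simp only [List.mem_filter]
        exact ⟨h2, by simpa using hle⟩
      · intro y hy
        simp only [List.mem_filter, decide_eq_true_eq] at hy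
        exact h5 hle y hy.1 hy.2
  | succ f ih =>
    by_cases hgt : number > 10
    · rw [pvWhileA, if_pos hgt]
      show (match PySem.List.max? (I.filter (fun x => !(PySem.Set.contains (PySem.Set.add pm number) x))) (fun y => y) with
            | none => (none : Option Int)
            | some m => pvWhileA I f (PySem.Set.add pm number) m)
          = PySem.List.max? (I.filter (fun v => decide (v ≤ 10))) (fun y => y)
      rcases h3 with ⟨x0, hx0I, hx0le⟩
      have hx0npm : PySem.Set.contains (PySem.Set.add pm number) x0 = false := by
        cases hc : PySem.Set.contains (PySem.Set.add pm number) x0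
        · rfl
        · exfalso
          rcases (PySem.Set.mem_add pm number x0).mp
            ((pvSetContainsIffMem _ _).mp hc) with hmem | heq
          · exact absurd hx0le (by have := h1 x0 hmem; omega)
          · omega
      have hgenne : x0 ∈ I.filter (fun x => !(PySem.Set.contains (PySem.Set.add pm number) x)) := by
        simp only [List.mem_filter]
        exact ⟨hx0I, by rw [hx0npm]; rfl⟩
      cases hmax : PySem.List.max? (I.filter (fun x => !(PySem.Set.contains (PySem.Set.add pm number) x))) (fun y => y) with
      | none =>
        exfalso
        have := (PySem.List.max?_eq_none_iff _ _).mp hmax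
        rw [this] at hgenne
        simp at hgenne
      | some m =>
        show pvWhileA I f (PySem.Set.add pm number) m = _
        have hmmem := PySem.List.max?_mem hmax
        simp only [List.mem_filter] at hmmem
        have hmI : m ∈ I := hmmem.1
        have hmnpm : PySem.Set.contains (PySem.Set.add pm number) m = false := by
          simpa using hmmem.2
        have hmmax := PySem.List.max?_isMax hmax
        apply ih
        · intro x hx
          rcases (PySem.Set.mem_add pm number x).mp hx with hmem | heq
          · exact h1 x hmem
          · omega
        · exact hmI
        · rw [pvMeasureAdd I _ m hmI hmnpm]
          have := pvMeasureAdd I pm number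
          have hstep : pvMeasure I (PySem.Set.add pm number) ≥ 1 := by
            unfold pvMeasure
            apply List.length_pos_of_mem (a := x0)
            simp only [List.mem_filter]
            exact ⟨(PySem.Set.mem_ofList I x0).mpr hx0I, by rw [hx0npm]; rfl⟩
          omega
        · intro hmle y hyI hyle
          have hynpm : PySem.Set.contains (PySem.Set.add pm number) y = false := by
            cases hc : PySem.Set.contains (PySem.Set.add pm number) y
            · rfl
            · exfalso
              rcases (PySem.Set.mem_add pm number y).mp
                ((pvSetContainsIffMem _ _).mp hc) with hmem | heq
              · exact absurd hyle (by have := h1 y hmem; omega)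
              · omega
          exact hmmax y (by simp only [List.mem_filter]; exact ⟨hyI, by rw [hynpm]; rfl⟩)
    · have hle : number ≤ 10 := by omega
      rw [pvWhileA, if_neg (by omega)]
      symm
      apply pvMaxChar
      · simp only [List.mem_filter]
        exact ⟨h2, by simpa using hle⟩
      · intro y hy
        simp only [List.mem_filter, decide_eq_true_eq] at hy
        exact h5 hle y hy.1 hy.2

-- ---- characterizations of the two ports' intermediate values ----

def pvF (cs : List Int) (j : Int) : Bool :=
  if j == 0 then false
  else PySem.List.pyGetD cs j 0 == PySem.List.pyGetD cs (j - 1) 0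

def pvCounts (lines : List (String × List String)) : List Int :=
  lines.map (fun x => ((x.2.length : Int)))

def pvBrk (cs : List Int) : List Int :=
  (PySem.List.pyRange 1 (cs.length : Int)).filter
    (fun i => !(PySem.List.pyGetD cs i 0 == PySem.List.pyGetD cs (i - 1) 0))

def pvChain (n : Int) : Int :=
  if PySem.Int.mod n 5 == 0 then 5
  else if PySem.Int.mod n 4 == 0 then 4
  else if PySem.Int.mod n 3 == 0 then 3
  else if PySem.Int.mod n 2 == 0 then 2
  else 1

-- the common value both ports compute, phrased over the line-length list
def pvRes (cs : List Int) : Int :=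
  if (pvBrk cs).isEmpty then pvChain (cs.length : Int)
  else
    let I := pvGaps 0 (pvBrk cs) (cs.length : Int)
    let cnt := PySem.Dict.counter I
    let number := (PySem.List.max2? cnt.keys (fun v => cnt.getD v 0) (fun v => v)).getD 0
    if number ≤ 10 then number
    else (PySem.List.max? (I.filter (fun v => decide (v ≤ 10))) (fun y => y)).getD 0

theorem pvEqA (cs : List Int) :
    (PySem.List.enumerate cs).foldl
      (fun eq p => eq ++ [if p.1 == 0 then false
                          else p.2 == PySem.List.pyGetD cs (p.1 - 1) 0]) []
    = (PySem.List.pyRange 0 (cs.length : Int)).map (pvF cs) := by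
  rw [PySem.List.foldl_append_singleton_eq_map, List.nil_append,
    PySem.List.enumerate_eq_map_pyRange cs 0, List.map_map]
  rfl

theorem pvChainEq (n : Int) :
    (PySem.List.pyRange 2 6).foldl
      (fun number i => if PySem.Int.mod n i == 0 then i else number) 1 = pvChain n := by
  have h : PySem.List.pyRange 2 6 = [2, 3, 4, 5] := by decide
  rw [h]
  simp only [List.foldl_cons, List.foldl_nil]
  rfl

theorem pvCond (cs : List Int) (hne : cs ≠ []) :
    ((PySem.List.pyRange 0 (cs.length : Int)).map (pvF cs)).tail.contains false
    = !(pvBrk cs).isEmpty := by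
  have hn : (0 : Int) < (cs.length : Int) := by
    have := List.length_pos_of_ne_nil hne
    exact_mod_cast this
  rw [PySem.List.pyRange_one_cons hn, List.map_cons, List.tail_cons, zero_add]
  rw [Bool.eq_iff_iff]
  unfold pvBrk
  constructor
  · intro h
    have hmem : false ∈ (PySem.List.pyRange 1 (cs.length : Int)).map (pvF cs) := by
      simpa using h
    rcases List.mem_map.mp hmem with ⟨j, hj, hFj⟩
    have hj1 : 1 ≤ j := (PySem.List.mem_pyRange_one.mp hj).1
    have hj0 : (j == 0) = false := by simp; omega
    have hX : (PySem.List.pyGetD cs j 0 == PySem.List.pyGetD cs (j - 1) 0) = false := by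
      simpa [pvF, hj0] using hFj
    have hne2 : (PySem.List.pyRange 1 (cs.length : Int)).filter
        (fun i => !(PySem.List.pyGetD cs i 0 == PySem.List.pyGetD cs (i - 1) 0)) ≠ [] := by
      intro hnil
      have := List.filter_eq_nil_iff.mp hnil j hj
      simp [hX] at this
    simpa using hne2
  · intro h
    have hne2 : (PySem.List.pyRange 1 (cs.length : Int)).filter
        (fun i => !(PySem.List.pyGetD cs i 0 == PySem.List.pyGetD cs (i - 1) 0)) ≠ [] := by
      simpa using h
    rcases List.exists_mem_of_ne_nil _ hne2 with ⟨b, hb⟩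
    rcases List.mem_filter.mp hb with ⟨hbr, hbp⟩
    have hb1 : 1 ≤ b := (PySem.List.mem_pyRange_one.mp hbr).1
    have hb0 : (b == 0) = false := by simp; omega
    have hFb : pvF cs b = false := by
      unfold pvF
      rw [hb0]
      simpa using hbp
    have hmem : false ∈ (PySem.List.pyRange 1 (cs.length : Int)).map (pvF cs) :=
      List.mem_map.mpr ⟨b, hbr, hFb⟩
    simpa using hmem

theorem pvStFold (cs : List Int) (hne : cs ≠ []) :
    (PySem.List.enumerate ((PySem.List.pyRange 0 (cs.length : Int)).map (pvF cs))).foldl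
      (fun (st : List Int × Int) p =>
        if p.1 == 0 then st
        else if !p.2 then (st.1 ++ [p.1 - st.2], p.1) else st) ([], 0)
    = (pvGapsInit 0 (pvBrk cs), pvLastD 0 (pvBrk cs)) := by
  have hn : (0 : Int) < (cs.length : Int) := by
    have := List.length_pos_of_ne_nil hne
    exact_mod_cast this
  rw [PySem.List.enumerate_eq_map_pyRange _ false, List.foldl_map]
  have hlen : PySem.List.len ((PySem.List.pyRange 0 (cs.length : Int)).map (pvF cs))
      = (cs.length : Int) := by
    simp [PySem.List.len_eq, PySem.List.length_pyRange_one]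
  rw [hlen]
  have hbody : ∀ (st : List Int × Int) (j : Int), j ∈ PySem.List.pyRange 0 (cs.length : Int) →
      (fun (st : List Int × Int) j =>
        (fun (st : List Int × Int) p =>
          if p.1 == 0 then st
          else if !p.2 then (st.1 ++ [p.1 - st.2], p.1) else st) st
          (j, PySem.List.pyGetD ((PySem.List.pyRange 0 (cs.length : Int)).map (pvF cs)) j false)) st j
      = (fun (st : List Int × Int) j =>
          if j == 0 then st
          else if !(pvF cs j) then (st.1 ++ [j - st.2], j) else st) st j := by
    intro st j hj
    rcases PySem.List.mem_pyRange_one.mp hj with ⟨hj0, hjn⟩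
    simp only
    rw [PySem.List.pyGetD_map_pyRange_of_nonneg (pvF cs) _ j false hj0 hjn]
  rw [PySem.List.foldl_congr_mem _ _ _ _ hbody]
  rw [PySem.List.pyRange_one_cons hn, List.foldl_cons]
  rw [if_pos (show (((0 : Int) == 0) = true) from rfl)]
  have hbody2 : ∀ (st : List Int × Int) (j : Int), j ∈ PySem.List.pyRange (0 + 1) (cs.length : Int) →
      (fun (st : List Int × Int) j =>
        if j == 0 then st
        else if !(pvF cs j) then (st.1 ++ [j - st.2], j) else st) st j
      = (fun (st : List Int × Int) j =>
          if (!(PySem.List.pyGetD cs j 0 == PySem.List.pyGetD cs (j - 1) 0)) = true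
          then (st.1 ++ [j - st.2], j) else st) st j := by
    intro st j hj
    rw [zero_add] at hj
    rcases PySem.List.mem_pyRange_one.mp hj with ⟨hj1, hjn⟩
    have hj0 : (j == 0) = false := by simp; omega
    have hFj : pvF cs j = (PySem.List.pyGetD cs j 0 == PySem.List.pyGetD cs (j - 1) 0) := by
      unfold pvF
      rw [hj0]
      simp
    simp only [hj0, hFj, Bool.false_eq_true, if_false]
  rw [PySem.List.foldl_congr_mem _ _ _ _ hbody2,
    PySem.List.foldl_if_eq_foldl_filter
      (fun j => !(PySem.List.pyGetD cs j 0 == PySem.List.pyGetD cs (j - 1) 0))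
      (fun (st : List Int × Int) j => (st.1 ++ [j - st.2], j))]
  rw [zero_add]
  exact pvGfold _ _ _

theorem pvBMem (cs : List Int) (k : Int)
    (hb : pvIsBoundary cs (cs.length : Int) k = true) :
    k ∈ 0 :: (pvBrk cs ++ [(cs.length : Int)]) := by
  unfold pvIsBoundary at hb
  simp only [Bool.or_eq_true, Bool.and_eq_true, beq_iff_eq, decide_eq_true_eq] at hb
  rcases hb with (h0 | hn) | ⟨⟨h1, h2⟩, h3⟩
  · simp [h0]
  · simp [hn]
  · refine List.mem_cons_of_mem _ (List.mem_append_left _ ?_)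
    unfold pvBrk
    refine List.mem_filter.mpr ⟨PySem.List.mem_pyRange_one.mpr ⟨h1, h2⟩, by simpa using h3⟩

theorem pvBpsPairwise (cs : List Int) (hne : cs ≠ []) :
    (0 :: (pvBrk cs ++ [(cs.length : Int)])).Pairwise (· < ·) := by
  have hmem : ∀ b ∈ pvBrk cs, 1 ≤ b ∧ b < (cs.length : Int) := by
    intro b hb
    exact PySem.List.mem_pyRange_one.mp (List.mem_filter.mp hb).1
  have hbrk : (pvBrk cs).Pairwise (· < ·) :=
    (PySem.List.pairwise_lt_pyRange_one 1 (cs.length : Int)).filter _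
  have hn : (0 : Int) < (cs.length : Int) := by
    have := List.length_pos_of_ne_nil hne
    exact_mod_cast this
  rw [List.pairwise_cons]
  constructor
  · intro x hx
    rcases List.mem_append.mp hx with h | h
    · have := hmem x h; omega
    · simp at h; omega
  · rw [List.pairwise_append]
    refine ⟨hbrk, by simp, ?_⟩
    intro a ha b hb
    simp at hb
    subst hb
    exact (hmem a ha).2

-- some interval is ≤ 10 on every input Pre_ admits (given a break exists)
theorem pvSmallInterval (lines : List (String × List String))
    (hpre : Pre_calculate_lines_per_gloss lines)
    (hne : pvCounts lines ≠ []) (hbne : pvBrk (pvCounts lines) ≠ []) :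
    ∃ v ∈ pvGaps 0 (pvBrk (pvCounts lines)) ((pvCounts lines).length : Int), v ≤ 10 := by
  have hlen : ((pvCounts lines).length : Int) = (lines.length : Int) := by
    unfold pvCounts; simp
  unfold Pre_calculate_lines_per_gloss at hpre
  rcases hpre with hall | ⟨i, _, j, _, hbi, hbj, hij, hdist⟩
  · exfalso
    rcases List.exists_mem_of_ne_nil _ hbne with ⟨b, hb⟩
    rcases List.mem_filter.mp hb with ⟨hbr, hbp⟩
    rw [hlen] at hbr
    have := hall b hbr
    unfold pvCounts at this
    simp only [Bool.not_eq_eq_eq_not, Bool.not_true, beq_eq_false_iff_ne, ne_eq] at hbp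
    exact hbp this
  · have hbi' : pvIsBoundary (pvCounts lines) ((pvCounts lines).length : Int) i = true := by
      rw [hlen]; exact hbi
    have hbj' : pvIsBoundary (pvCounts lines) ((pvCounts lines).length : Int) j = true := by
      rw [hlen]; exact hbj
    have hdl := pvDiffLe (0 :: (pvBrk (pvCounts lines) ++ [((pvCounts lines).length : Int)]))
      (pvBpsPairwise _ hne) i j (pvBMem _ _ hbi') (pvBMem _ _ hbj') hij
    rcases hdl with ⟨v, hv, hvle⟩
    rw [pvDiffs_cons_append] at hv
    exact ⟨v, hv, by omega⟩

-- ---- the A side equals pvRes (unchanged machinery) ----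

theorem pvA_eq (p0 : String × List String) (ps : List (String × List String))
    (hpre : Pre_calculate_lines_per_gloss (p0 :: ps)) :
    calculate_lines_per_gloss (p0 :: ps) = pvRes (pvCounts (p0 :: ps)) := by
  have hne : pvCounts (p0 :: ps) ≠ [] := by simp [pvCounts]
  have hlen : (((p0 :: ps).length : Nat) : Int) = ((pvCounts (p0 :: ps)).length : Int) := by
    simp [pvCounts]
  simp only [calculate_lines_per_gloss]
  rw [show (p0 :: ps).map (fun x => ((x.2.length : Int))) = pvCounts (p0 :: ps) from rfl]
  rw [pvEqA, PySem.List.slice_from_one, hlen, pvCond _ hne]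
  simp only [Bool.not_not]
  unfold pvRes
  by_cases hb : (pvBrk (pvCounts (p0 :: ps))).isEmpty
  · rw [if_pos hb, if_pos hb, pvChainEq]
  · rw [if_neg hb, if_neg hb, pvStFold _ hne]
    have hbne : pvBrk (pvCounts (p0 :: ps)) ≠ [] := by
      simpa [List.isEmpty_iff] using hb
    have hlen2 : ((((PySem.List.pyRange 0 ((pvCounts (p0 :: ps)).length : Int)).map
        (pvF (pvCounts (p0 :: ps)))).length : Nat) : Int)
        = ((pvCounts (p0 :: ps)).length : Int) := by
      simp [PySem.List.length_pyRange_one]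
    rw [hlen2]
    have harith : (((pvCounts (p0 :: ps)).length : Int) - 1) + 1
          - pvLastD 0 (pvBrk (pvCounts (p0 :: ps)))
        = ((pvCounts (p0 :: ps)).length : Int) - pvLastD 0 (pvBrk (pvCounts (p0 :: ps))) := by
      ring
    rw [harith, ← pvGaps_split]
    set I := pvGaps 0 (pvBrk (pvCounts (p0 :: ps))) ((pvCounts (p0 :: ps)).length : Int) with hI
    set cnt := PySem.Dict.counter I with hcnt
    set number := (PySem.List.max2? cnt.keys (fun v => cnt.getD v 0) (fun v => v)).getD 0 with hnum
    by_cases hle : number ≤ 10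
    · rw [if_neg (by omega : ¬ number > 10), if_pos hle]
    · rw [if_pos (by omega : number > 10), if_neg hle]
      have hIne : I ≠ [] := pvGaps_ne_nil _ _ _
      have hkeys : cnt.keys = PySem.Set.ofList I := PySem.Dict.keys_counter I
      have hkeysne : cnt.keys ≠ [] := by
        rw [hkeys]
        intro hnil
        rcases I with _ | ⟨x, t⟩
        · exact hIne rfl
        · have hx : x ∈ PySem.Set.ofList (x :: t) :=
            (PySem.Set.mem_ofList _ x).mpr (List.mem_cons_self ..)
          rw [hnil] at hx
          simp at hx
      obtain ⟨m, hm⟩ := pvMax2Some cnt.keys (fun v => cnt.getD v 0) (fun v => v) hkeysne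
      have hnm : number = m := by rw [hnum, hm]; rfl
      have hmemI : number ∈ I := by
        rw [hnm]
        have := pvMax2Mem cnt.keys _ _ m hm
        rw [hkeys] at this
        exact (PySem.Set.mem_ofList I m).mp this
      have hwhile := pvWhileLemma I I.length (PySem.Set.ofList [number]) number
        (by
          intro x hx
          have : x = number := by
            have := (PySem.Set.mem_ofList [number] x).mp hx
            simpa using this
          omega)
        hmemI
        (by
          have := pvSmallInterval (p0 :: ps) hpre hne hbne
          rw [← hI] at this
          exact this)
        (by
          have hcadd : PySem.Set.add (PySem.Set.ofList [number]) number
              = PySem.Set.ofList [number] := by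
            unfold PySem.Set.add
            rw [if_pos]
            exact (pvSetContainsIffMem _ _).mpr
              ((PySem.Set.mem_ofList [number] number).mpr (List.mem_singleton.mpr rfl))
          rw [hcadd]
          exact pvMeasureLe I _)
        (fun h => absurd h hle)
      rw [hwhile]

-- ---- the B side equals pvRes ----

-- the uniformity tests agree: at most one distinct value ↔ no break position
theorem pvGetNice (cs : List Int) (i : Int) (h0 : 0 ≤ i) :
    PySem.List.pyGetD cs i 0 = cs.getD i.toNat 0 := by
  have : i = ((i.toNat : Nat) : Int) := by omega
  rw [this, PySem.List.pyGetD_natCast, Int.toNat_natCast]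

def pvAllEq (cs : List Int) : Prop := ∀ x ∈ cs, ∀ y ∈ cs, x = y

theorem pvSetLe1_iff_allEq (cs : List Int) :
    (PySem.Set.len (PySem.Set.ofList cs) ≤ 1) ↔ pvAllEq cs := by
  have hnd := PySem.Set.nodup_ofList cs
  rw [show PySem.Set.len (PySem.Set.ofList cs) = ((PySem.Set.ofList cs).length : Int) from by
    simp [PySem.Set.len]]
  constructor
  · intro h x hx y hy
    have hlen : (PySem.Set.ofList cs).length ≤ 1 := by exact_mod_cast h
    have hx' := (PySem.Set.mem_ofList cs x).mpr hx
    have hy' := (PySem.Set.mem_ofList cs y).mpr hy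
    rcases hl : PySem.Set.ofList cs with _ | ⟨a, t⟩
    · rw [hl] at hx'; simp at hx'
    · rcases t with _ | ⟨b, u⟩
      · rw [hl] at hx' hy'
        simp at hx' hy'
        rw [hx', hy']
      · rw [hl] at hlen; simp at hlen
  · intro h
    rcases hl : PySem.Set.ofList cs with _ | ⟨a, t⟩
    · simp
    · rcases t with _ | ⟨b, u⟩
      · simp
      · exfalso
        have ha : a ∈ cs := (PySem.Set.mem_ofList cs a).mp (by rw [hl]; simp)
        have hb : b ∈ cs := (PySem.Set.mem_ofList cs b).mp (by rw [hl]; simp)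
        have : a ≠ b := by
          rw [hl] at hnd
          exact (List.nodup_cons.mp hnd).1 ∘ (fun he => he ▸ List.mem_cons_self ..)
        exact this (h a ha b hb)

theorem pvBrk_nil_iff_allEq (cs : List Int) :
    pvBrk cs = [] ↔ pvAllEq cs := by
  constructor
  · intro h
    have hadj : ∀ i ∈ PySem.List.pyRange 1 (cs.length : Int),
        PySem.List.pyGetD cs i 0 = PySem.List.pyGetD cs (i - 1) 0 := by
      intro i hi
      have := List.filter_eq_nil_iff.mp h i hi
      simpa using this
    have hzero : ∀ k : Nat, (hk : k < cs.length) → cs[k] = cs[0]'(by omega) := by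
      intro k
      induction k with
      | zero => intro _; rfl
      | succ j ih =>
        intro hk
        have hj : j < cs.length := by omega
        have hmem : ((j + 1 : Nat) : Int) ∈ PySem.List.pyRange 1 (cs.length : Int) := by
          rw [PySem.List.mem_pyRange_one]
          constructor <;> [omega; exact_mod_cast hk]
        have := hadj _ hmem
        rw [pvGetNice cs _ (by omega), pvGetNice cs _ (by omega)] at this
        have e1 : ((j + 1 : Nat) : Int).toNat = j + 1 := by omega
        have e2 : (((j + 1 : Nat) : Int) - 1).toNat = j := by omega
        rw [e1, e2, List.getD_eq_getElem cs 0 hk, List.getD_eq_getElem cs 0 hj] at this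
        rw [this]
        exact ih hj
    intro x hx y hy
    rcases List.mem_iff_getElem.mp hx with ⟨p, hp, rfl⟩
    rcases List.mem_iff_getElem.mp hy with ⟨q, hq, rfl⟩
    rw [hzero p hp, hzero q hq]
  · intro h
    apply List.filter_eq_nil_iff.mpr
    intro i hi
    rcases PySem.List.mem_pyRange_one.mp hi with ⟨h1, h2⟩
    have e1 := pvGetNice cs i (by omega)
    have e2 := pvGetNice cs (i - 1) (by omega)
    have hi1 : i.toNat < cs.length := by omega
    have hi2 : (i - 1).toNat < cs.length := by omega
    rw [List.getD_eq_getElem cs 0 hi1] at e1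
    rw [List.getD_eq_getElem cs 0 hi2] at e2
    have hm1 : cs[i.toNat] ∈ cs := List.getElem_mem _
    have hm2 : cs[(i-1).toNat] ∈ cs := List.getElem_mem _
    have := h _ hm1 _ hm2
    simp [e1, e2, this]

theorem pvSetLe1_iff_brk_nil (cs : List Int) :
    (PySem.Set.len (PySem.Set.ofList cs) ≤ 1) ↔ pvBrk cs = [] := by
  rw [pvSetLe1_iff_allEq, pvBrk_nil_iff_allEq]

-- the recursive run-length encoding equals the gap lengths between break points
theorem pvRunScan_eq_c (c0 : Int) (t : List Int) :
    ∀ j, j < pvRunScan c0 t → t.getD j 0 = c0 := by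
  induction t with
  | nil => intro j hj; simp [pvRunScan] at hj
  | cons c u ih =>
    intro j hj
    unfold pvRunScan at hj
    by_cases hc : (c != c0) = true
    · rw [if_pos hc] at hj; omega
    · rw [if_neg hc] at hj
      have hceq : c = c0 := by simpa using hc
      cases j with
      | zero => simpa using hceq
      | succ p => exact ih p (by omega)

theorem pvRunScan_stop (c0 : Int) (t : List Int) (h : pvRunScan c0 t < t.length) :
    t.getD (pvRunScan c0 t) 0 ≠ c0 := by
  induction t with
  | nil => simp at h
  | cons c u ih =>
    unfold pvRunScan at h ⊢
    by_cases hc : (c != c0) = true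
    · rw [if_pos hc] at h ⊢
      simpa using hc
    · rw [if_neg hc] at h ⊢
      have h2 : pvRunScan c0 u < u.length := by simp at h; omega
      rw [show 1 + pvRunScan c0 u = pvRunScan c0 u + 1 from by omega]
      simpa using ih h2

-- prefix of the whole run list is constant

theorem pvPrefC (c : Int) (t : List Int) :
    ∀ j, j < 1 + pvRunScan c t → (c :: t).getD j 0 = c := by
  intro j hj
  cases j with
  | zero => rfl
  | succ p => exact pvRunScan_eq_c c t p (by omega)

theorem pvGaps_shift (bs : List Int) (x n k : Int) :
    pvGaps (x + k) (bs.map (· + k)) n = pvGaps x bs (n - k) := by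
  induction bs generalizing x with
  | nil => simp [pvGaps]; ring
  | cons b t ih =>
    simp only [List.map_cons, pvGaps, List.cons.injEq]
    exact ⟨by ring, ih b⟩

theorem pvRange_shift (a b k : Int) :
    PySem.List.pyRange (a + k) (b + k) 1 = (PySem.List.pyRange a b 1).map (· + k) := by
  rw [PySem.List.pyRange_one, PySem.List.pyRange_one, List.map_map]
  have : (b + k - (a + k)) = b - a := by ring
  rw [this]
  apply List.map_congr_left
  intro x _
  simp
  ring

theorem pvDropGetD (cs : List Int) (k j : Nat) :
    (cs.drop k).getD j 0 = cs.getD (k + j) 0 := by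
  simp [List.getD, List.getElem?_drop]

-- index transfer into the dropped tail

theorem pvGetDrop (cs : List Int) (k : Nat) (a : Int) (h0 : 0 ≤ a) :
    PySem.List.pyGetD (cs.drop k) a 0 = PySem.List.pyGetD cs (a + (k : Int)) 0 := by
  rw [pvGetNice _ _ h0, pvGetNice _ _ (by omega), pvDropGetD]
  congr 1
  omega

theorem pvBrk_cons (c : Int) (t : List Int) (h : pvRunScan c t < t.length) :
    pvBrk (c :: t) = (((1 + pvRunScan c t : Nat) : Int)) ::
      (pvBrk ((c :: t).drop (1 + pvRunScan c t))).map (· + ((1 + pvRunScan c t : Nat) : Int)) := by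
  set m := pvRunScan c t with hm
  set k : Nat := 1 + m with hk
  set K : Int := (k : Int) with hK
  set cs := c :: t with hcs
  set rest := cs.drop k with hrest
  have hrl : rest.length = t.length - m := by simp [hrest, hcs, hk]; omega
  have hn : (cs.length : Int) = (t.length : Int) + 1 := by simp [hcs]
  have hKn : K + 1 ≤ (cs.length : Int) := by simp [hK, hk, hcs]; omega
  have h1K : (1 : Int) ≤ K := by simp [hK, hk]
  -- split the index range at K and K+1
  rw [pvBrk, PySem.List.pyRange_one_append 1 K (cs.length : Int) h1K (by omega),
    PySem.List.pyRange_one_append K (K + 1) (cs.length : Int) (by omega) hKn,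
    List.filter_append, List.filter_append]
  -- below K: inside the first run, no break
  have hpart1 : (PySem.List.pyRange 1 K).filter
      (fun i => !(PySem.List.pyGetD cs i 0 == PySem.List.pyGetD cs (i - 1) 0)) = [] := by
    apply List.filter_eq_nil_iff.mpr
    intro i hi
    rcases PySem.List.mem_pyRange_one.mp hi with ⟨hi1, hi2⟩
    have e1 : PySem.List.pyGetD cs i 0 = c := by
      rw [pvGetNice _ _ (by omega)]
      exact pvPrefC c t i.toNat (by omega)
    have e2 : PySem.List.pyGetD cs (i - 1) 0 = c := by
      rw [pvGetNice _ _ (by omega)]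
      exact pvPrefC c t (i - 1).toNat (by omega)
    simp [e1, e2]
  -- at K: the first break
  have hpart2 : (PySem.List.pyRange K (K + 1)).filter
      (fun i => !(PySem.List.pyGetD cs i 0 == PySem.List.pyGetD cs (i - 1) 0)) = [K] := by
    rw [PySem.List.pyRange_one_singleton]
    have e1 : PySem.List.pyGetD cs K 0 = t.getD m 0 := by
      rw [pvGetNice _ _ (by omega)]
      have : K.toNat = m + 1 := by simp [hK, hk]; omega
      rw [this]
      rfl
    have e2 : PySem.List.pyGetD cs (K - 1) 0 = c := by
      rw [pvGetNice _ _ (by omega)]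
      exact pvPrefC c t (K - 1).toNat (by simp [hK, hk]; omega)
    have hne := pvRunScan_stop c t h
    simp [e1, e2]
    exact fun he => absurd he hne
  -- above K: breaks of the tail, shifted
  have hpart3 : (PySem.List.pyRange (K + 1) (cs.length : Int)).filter
      (fun i => !(PySem.List.pyGetD cs i 0 == PySem.List.pyGetD cs (i - 1) 0))
      = (pvBrk rest).map (· + K) := by
    have hlen : (cs.length : Int) = (rest.length : Int) + K := by
      rw [hn]
      simp [hK, hk]
      omega
    have hsh : PySem.List.pyRange (K + 1) (cs.length : Int)
        = (PySem.List.pyRange 1 (rest.length : Int)).map (· + K) := by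
      rw [hlen, show K + 1 = 1 + K from by ring, pvRange_shift]
    rw [hsh, List.filter_map, pvBrk]
    congr 1
    apply List.filter_congr
    intro j hj
    rcases PySem.List.mem_pyRange_one.mp hj with ⟨hj1, hj2⟩
    simp only [Function.comp]
    rw [show j + K - 1 = (j - 1) + K from by ring,
      ← pvGetDrop cs k j (by omega), ← pvGetDrop cs k (j - 1) (by omega)]
  rw [hpart1, hpart2, hpart3]
  simp

theorem pvRuns_eq_gaps_fuel : ∀ (N : Nat) (cs : List Int), cs.length ≤ N → cs ≠ [] →
    pvRuns cs = pvGaps 0 (pvBrk cs) (cs.length : Int) := by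
  intro N
  induction N with
  | zero =>
    intro cs hlen hne
    rcases cs with _ | _
    · exact absurd rfl hne
    · simp at hlen
  | succ N ih =>
    intro cs hlen hne
    rcases cs with _ | ⟨c, t⟩
    · exact absurd rfl hne
    set m := pvRunScan c t with hm
    have hml := pvRunScan_le c t
    rw [pvRuns]
    by_cases hcase : m < t.length
    · -- a break exists at m+1
      have hrw := pvBrk_cons c t hcase
      rw [hrw]
      set rest := (c :: t).drop (1 + m) with hrest
      have hrl : rest.length = t.length - m := by simp [hrest]; omega
      have hrne : rest ≠ [] := by
        intro hnil
        rw [hnil] at hrl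
        simp at hrl
        omega
      have hlt : t.length ≤ N := by simp at hlen; omega
      have hIH := ih rest (by omega) hrne
      simp only [pvGaps, List.cons.injEq]
      refine ⟨by omega, ?_⟩
      · have hsh := pvGaps_shift (pvBrk rest) 0 (((c :: t).length : Int))
          ((1 + pvRunScan c t : Nat) : Int)
        rw [zero_add] at hsh
        rw [hsh,
          show ((c :: t).length : Int) - ((1 + pvRunScan c t : Nat) : Int) = (rest.length : Int) from by
            simp [hrl]; omega]
        exact hIH
    · -- all of cs is one run
      have hmeq : m = t.length := by omega
      have hrest : (c :: t).drop (1 + m) = [] := by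
        apply List.drop_eq_nil_of_le
        simp
        omega
      have hbrk : pvBrk (c :: t) = [] := by
        apply List.filter_eq_nil_iff.mpr
        intro i hi
        rcases PySem.List.mem_pyRange_one.mp hi with ⟨hi1, hi2⟩
        have hlen2 : ((c :: t).length : Int) = (t.length : Int) + 1 := by simp
        have e1 : PySem.List.pyGetD (c :: t) i 0 = c := by
          rw [pvGetNice _ _ (by omega)]
          exact pvPrefC c t i.toNat (by omega)
        have e2 : PySem.List.pyGetD (c :: t) (i - 1) 0 = c := by
          rw [pvGetNice _ _ (by omega)]
          exact pvPrefC c t (i - 1).toNat (by omega)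
        simp [e1, e2]
      rw [hrest, hbrk]
      simp [pvRuns, pvGaps]
      omega

theorem pvRuns_eq_gaps (cs : List Int) (hne : cs ≠ []) :
    pvRuns cs = pvGaps 0 (pvBrk cs) (cs.length : Int) := by
  exact pvRuns_eq_gaps_fuel cs.length cs le_rfl hne

theorem pvMaxD_eq_chain (n : Int) :
    PySem.List.maxD (([2, 3, 4, 5] : List Int).filter
      (fun d => PySem.Int.mod n d == 0)) (fun x => x) 1 = pvChain n := by
  unfold pvChain
  by_cases h5 : (PySem.Int.mod n 5 == 0) = true <;>
  by_cases h4 : (PySem.Int.mod n 4 == 0) = true <;>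
  by_cases h3 : (PySem.Int.mod n 3 == 0) = true <;>
  by_cases h2 : (PySem.Int.mod n 2 == 0) = true <;>
  simp only [Bool.not_eq_true] at h5 h4 h3 h2 <;>
  simp only [List.filter_cons, List.filter_nil, h5, h4, h3, h2, if_false,
    Bool.false_eq_true, if_pos] <;>
  decide

-- the two-stage max (peak multiplicity, then largest value at it) equals the
-- composite-key max of A
theorem pvTwoStage_eq_max2 (I : List Int) (hne : I ≠ []) :
    (PySem.List.max? ((PySem.Dict.counter I).keys.filter
        (fun v => (PySem.Dict.counter I).getD v 0 ==
          (PySem.List.max? (PySem.Dict.counter I).values (fun y => y)).getD 0)) (fun y => y)).getD 0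
    = (PySem.List.max2? (PySem.Dict.counter I).keys
        (fun v => (PySem.Dict.counter I).getD v 0) (fun v => v)).getD 0 := by
  set c := PySem.Dict.counter I with hc
  have hkeys : c.keys = PySem.Set.ofList I := PySem.Dict.keys_counter I
  have hnd : c.keys.Nodup := by rw [hkeys]; exact PySem.Set.nodup_ofList I
  have hkeysne : c.keys ≠ [] := by
    rw [hkeys]
    intro hnil
    rcases I with _ | ⟨x, t⟩
    · exact hne rfl
    · have hx : x ∈ PySem.Set.ofList (x :: t) :=
        (PySem.Set.mem_ofList _ x).mpr (List.mem_cons_self ..)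
      rw [hnil] at hx
      simp at hx
  have hvals : c.values = c.keys.map (fun k => c.getD k 0) :=
    PySem.Dict.values_eq_map_keys c hnd 0
  -- the maximal multiplicity
  have hvne : c.values ≠ [] := by
    rw [hvals]
    simpa using hkeysne
  obtain ⟨T, hT⟩ : ∃ T, PySem.List.max? c.values (fun y => y) = some T := by
    cases hm : PySem.List.max? c.values (fun y => y) with
    | none => exact absurd ((PySem.List.max?_eq_none_iff _ _).mp hm) hvne
    | some w => exact ⟨w, rfl⟩
  have hTmem := PySem.List.max?_mem hT
  have hTmax := PySem.List.max?_isMax hT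
  rw [hvals] at hTmem
  rcases List.mem_map.mp hTmem with ⟨u, hu, huT⟩
  have hTub : ∀ y ∈ c.keys, c.getD y 0 ≤ T := by
    intro y hy
    exact hTmax _ (by rw [hvals]; exact List.mem_map.mpr ⟨y, hy, rfl⟩)
  -- the composite-key maximum
  obtain ⟨M, hM⟩ := pvMax2Some c.keys (fun v => c.getD v 0) (fun v => v) hkeysne
  have hMmem := pvMax2Mem _ _ _ _ hM
  have hMlex := pvMax2IsMax _ _ _ _ hM
  have hMT : c.getD M 0 = T := by
    have h1 : c.getD M 0 ≤ T := hTub M hMmem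
    have h2 := hMlex u hu
    omega
  have hfilt : PySem.List.max? (c.keys.filter
      (fun v => c.getD v 0 == (PySem.List.max? c.values (fun y => y)).getD 0)) (fun y => y)
      = some M := by
    apply pvMaxChar
    · refine List.mem_filter.mpr ⟨hMmem, ?_⟩
      rw [hT]
      simpa using hMT
    · intro y hy
      rcases List.mem_filter.mp hy with ⟨hyk, hyv⟩
      rw [hT] at hyv
      have hyT : c.getD y 0 = T := by simpa using hyv
      have := hMlex y hyk
      omega
  rw [hfilt, hM]

theorem pvB_eq (lines : List (String × List String)) :
    calculate_lines_per_gloss_alt lines = pvRes (pvCounts lines) := by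
  have hcs : lines.map (fun x => ((x.2.length : Int))) = pvCounts lines := rfl
  have hlen : ((lines.length : Nat) : Int) = ((pvCounts lines).length : Int) := by
    simp [pvCounts]
  simp only [calculate_lines_per_gloss_alt, hcs]
  unfold pvRes
  by_cases h1 : PySem.Set.len (PySem.Set.ofList (pvCounts lines)) ≤ 1
  · have hbrk : pvBrk (pvCounts lines) = [] := (pvSetLe1_iff_brk_nil _).mp h1
    rw [if_pos h1, if_pos (show ((pvBrk (pvCounts lines)).isEmpty = true) by simp [hbrk]),
      hlen, pvMaxD_eq_chain]
  · have hbrk : pvBrk (pvCounts lines) ≠ [] := by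
      intro h
      exact h1 ((pvSetLe1_iff_brk_nil _).mpr h)
    have hne : pvCounts lines ≠ [] := by
      intro h
      apply h1
      rw [h]
      decide
    rw [if_neg h1,
      if_neg (show ¬((pvBrk (pvCounts lines)).isEmpty = true) by simp [hbrk]),
      pvRuns_eq_gaps _ hne,
      pvTwoStage_eq_max2 _ (pvGaps_ne_nil _ _ _)]

theorem pv_main (lines : List (String × List String))
    (hpre : Pre_calculate_lines_per_gloss lines) :
    calculate_lines_per_gloss lines = calculate_lines_per_gloss_alt lines := by
  rcases lines with _ | ⟨p0, ps⟩
  · decide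
  · rw [pvA_eq p0 ps hpre, pvB_eq]

-- ===== VERDICT (by name: the statement is the Claim_ definition above) =====
theorem calculate_lines_per_gloss_spec : Claim_equal_calculate_lines_per_gloss := by
  intro lines _ hpre
  unfold Spec_calculate_lines_per_gloss
  exact pv_main lines hpre
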